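-- pv_equiv track=rewrite | github.com/subhande/Algoexpert | dynamic_programming/13_maximum_sum_submatrix.py | createSumMatric
-- ===== SOURCE A (Python) =====
-- def createSumMatric(matrix):
--     sums = [[0 for j in range(len(matrix[0]))] for i in range(len(matrix))]
--
--     sums[0][0] = matrix[0][0]
--
--     # Fill the first row
--     for idx in range(1, len(matrix[0])):
--         sums[0][idx] = sums[0][idx - 1] + matrix[0][idx]
--
--     # Fill the first col
--     for idx in range(1, len(matrix)):
--         sums[idx][0] = sums[idx - 1][0] + matrix[idx][0]
--
--     # Fill the rest of the matrix
--     for row in range(1, len(matrix)):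
--         for col in range(1, len(matrix[row])):
--             sums[row][col] = sums[row - 1][col] + sums[row][col - 1] - sums[row - 1][col - 1] + matrix[row][col]
--     return sums
-- ===== SOURCE B (Python) =====
-- def createSumMatric(matrix):
--     n, m = len(matrix), len(matrix[0])
--     # pass 1: horizontal running sums, row by row
--     sums = []
--     for i in range(n):
--         acc = 0
--         row = []
--         for j in range(m):
--             acc += matrix[i][j]
--             row.append(acc)
--         sums.append(row)
--     # pass 2: add each row to the accumulated rows above
--     for i in range(1, n):
--         for j in range(m):
--             sums[i][j] += sums[i - 1][j]
--     return sums
-- ===== Notes on version B (the rewrite author's own statement) =====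
-- stated objective: simpler
-- what changed: Replaces A's four special-cased loops (corner cell, first row, first column, inclusion-exclusion fill) by two uniform separable passes: a horizontal running-sum pass per row followed by a vertical pass that adds each row to the one above.
-- outside the precondition, e.g. on createSumMatric([[1, 2], [3]]): A returns [[1, 3], [4, 0]], B raises IndexError
import Mathlib
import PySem

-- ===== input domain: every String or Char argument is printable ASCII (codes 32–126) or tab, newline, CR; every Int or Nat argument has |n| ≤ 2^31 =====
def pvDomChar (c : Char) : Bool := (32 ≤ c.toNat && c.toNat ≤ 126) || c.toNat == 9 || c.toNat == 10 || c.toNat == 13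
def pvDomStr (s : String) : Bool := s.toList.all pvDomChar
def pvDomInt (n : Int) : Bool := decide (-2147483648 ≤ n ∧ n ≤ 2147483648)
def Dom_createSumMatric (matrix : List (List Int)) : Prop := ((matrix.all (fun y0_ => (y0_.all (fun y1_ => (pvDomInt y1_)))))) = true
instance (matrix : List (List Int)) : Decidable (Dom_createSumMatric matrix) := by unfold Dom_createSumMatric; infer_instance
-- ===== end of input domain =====

-- B replaces A's four special-cased loops by two uniform separable passes (horizontal
-- running sums per row, then a vertical pass adding each row to the one above): simpler.

-- ===== PORT A =====
-- matrix element / in-place cell update, as both Pythons use them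
def pvGet2 (xs : List (List Int)) (i j : Nat) : Int := (xs.getD i []).getD j 0

def pvSet2 (xs : List (List Int)) (i j : Nat) (v : Int) : List (List Int) :=
  xs.set i ((xs.getD i []).set j v)

def createSumMatric (matrix : List (List Int)) : List (List Int) :=
  let n := matrix.length
  let m := (matrix.headD []).length
  -- sums = [[0 for j in range(m)] for i in range(n)]
  let sums := (List.range n).map (fun _ => (List.range m).map (fun _ => (0 : Int)))
  -- sums[0][0] = matrix[0][0]
  let sums := pvSet2 sums 0 0 (pvGet2 matrix 0 0)
  -- fill the first row
  let sums := (List.range' 1 (m - 1)).foldl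
    (fun s idx => pvSet2 s 0 idx (pvGet2 s 0 (idx - 1) + pvGet2 matrix 0 idx)) sums
  -- fill the first col
  let sums := (List.range' 1 (n - 1)).foldl
    (fun s idx => pvSet2 s idx 0 (pvGet2 s (idx - 1) 0 + pvGet2 matrix idx 0)) sums
  -- fill the rest of the matrix
  let sums := (List.range' 1 (n - 1)).foldl
    (fun s row => (List.range' 1 ((matrix.getD row []).length - 1)).foldl
      (fun s col => pvSet2 s row col
        (pvGet2 s (row - 1) col + pvGet2 s row (col - 1) - pvGet2 s (row - 1) (col - 1)
          + pvGet2 matrix row col)) s) sums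
  sums

-- ===== PORT B =====
-- one row of pass 1: acc = 0; for j in range(m): acc += r[j]; row.append(acc)
def pvHRow (r : List Int) (m : Nat) : List Int :=
  ((List.range m).foldl (fun (p : Int × List Int) j =>
    let a := p.1 + r.getD j 0
    (a, p.2 ++ [a])) ((0 : Int), ([] : List Int))).2

def createSumMatric_alt (matrix : List (List Int)) : List (List Int) :=
  let n := matrix.length
  let m := (matrix.headD []).length
  -- pass 1: horizontal running sums, row by row
  let sums := (List.range n).foldl (fun s i => s ++ [pvHRow (matrix.getD i []) m]) []
  -- pass 2: add each row to the accumulated rows above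
  (List.range' 1 (n - 1)).foldl
    (fun s i => (List.range m).foldl
      (fun s j => pvSet2 s i j (pvGet2 s i j + pvGet2 s (i - 1) j)) s) sums

-- ===== PRECONDITION & SPEC =====
-- Pre_ excludes the empty matrix and matrices whose first row is empty (A raises IndexError there)
-- and ragged matrices: on ragged ones A either raises or returns rows accidentally zero-padded to
-- the first row's width, and B itself raises IndexError there.
def Pre_createSumMatric (matrix : List (List Int)) : Prop :=
  matrix ≠ [] ∧ matrix.headD [] ≠ [] ∧ ∀ r ∈ matrix, r.length = (matrix.headD []).length
instance (matrix : List (List Int)) : Decidable (Pre_createSumMatric matrix) := by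
  unfold Pre_createSumMatric; infer_instance

def pvWitness_createSumMatric : List (List Int) := [[1, 2], [3, 4]]

def Spec_createSumMatric (matrix : List (List Int)) (out : List (List Int)) : Prop := out = createSumMatric_alt matrix
instance (matrix : List (List Int)) (out : List (List Int)) : Decidable (Spec_createSumMatric matrix out) := by unfold Spec_createSumMatric; infer_instance

-- ===== CLAIM (what is proved, stated in full; the proofs are below) =====
def Claim_equal_createSumMatric : Prop := ∀ (matrix : List (List Int)), Dom_createSumMatric matrix → Pre_createSumMatric matrix → Spec_createSumMatric matrix (createSumMatric matrix)

-- ===== LEMMAS AND PROOFS =====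

-- the grid of values of f, and the 2-D prefix sums both programs compute
def pvGrid (n m : Nat) (f : Nat → Nat → Int) : List (List Int) :=
  (List.range n).map (fun i => (List.range m).map (fun j => f i j))

def pvR (matrix : List (List Int)) (i j : Nat) : Int :=
  ∑ b ∈ Finset.range (j + 1), pvGet2 matrix i b

def pvP (matrix : List (List Int)) (i j : Nat) : Int :=
  ∑ a ∈ Finset.range (i + 1), ∑ b ∈ Finset.range (j + 1), pvGet2 matrix a b

theorem pvP_00 (matrix : List (List Int)) : pvP matrix 0 0 = pvGet2 matrix 0 0 := by
  simp [pvP]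

theorem pvP_row (matrix : List (List Int)) (j : Nat) :
    pvP matrix 0 (j + 1) = pvP matrix 0 j + pvGet2 matrix 0 (j + 1) := by
  simp [pvP, Finset.sum_range_one, Finset.sum_range_succ]

theorem pvP_col (matrix : List (List Int)) (i : Nat) :
    pvP matrix (i + 1) 0 = pvP matrix i 0 + pvGet2 matrix (i + 1) 0 := by
  simp [pvP, Finset.sum_range_one, Finset.sum_range_succ]

theorem pvR_succ (matrix : List (List Int)) (i j : Nat) :
    pvR matrix i (j + 1) = pvR matrix i j + pvGet2 matrix i (j + 1) := by
  simp [pvR, Finset.sum_range_succ]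

theorem pvP_step (matrix : List (List Int)) (i j : Nat) :
    pvP matrix (i + 1) j = pvP matrix i j + pvR matrix (i + 1) j := by
  simp [pvP, pvR, Finset.sum_range_succ]

theorem pvP_zero_row (matrix : List (List Int)) (j : Nat) : pvP matrix 0 j = pvR matrix 0 j := by
  simp [pvP, pvR, Finset.sum_range_one]

theorem pvP_rect (matrix : List (List Int)) (i j : Nat) :
    pvP matrix (i + 1) (j + 1)
      = pvP matrix i (j + 1) + pvP matrix (i + 1) j - pvP matrix i j + pvGet2 matrix (i + 1) (j + 1) := by
  have h1 := pvP_step matrix i (j + 1)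
  have h2 := pvP_step matrix i j
  have h3 := pvR_succ matrix (i + 1) j
  omega

theorem pvGrid_congr {n m : Nat} {f f' : Nat → Nat → Int}
    (h : ∀ a < n, ∀ b < m, f a b = f' a b) : pvGrid n m f = pvGrid n m f' := by
  unfold pvGrid
  refine List.map_congr_left ?_
  intro a ha
  refine List.map_congr_left ?_
  intro b hb
  exact h a (List.mem_range.mp ha) b (List.mem_range.mp hb)

theorem pvGridRow {n m : Nat} (f : Nat → Nat → Int) {i : Nat} (hi : i < n) :
    (pvGrid n m f).getD i [] = (List.range m).map (fun j => f i j) := by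
  rw [List.getD_eq_getElem?_getD]
  simp [pvGrid, hi]

theorem pvGet2_grid {n m : Nat} (f : Nat → Nat → Int) {i j : Nat} (hi : i < n) (hj : j < m) :
    pvGet2 (pvGrid n m f) i j = f i j := by
  rw [pvGet2, pvGridRow f hi, List.getD_eq_getElem?_getD]
  simp [hj]

theorem pvSetMapRange {α : Type} {m j : Nat} (v : α) (h : Nat → α) (hj : j < m) :
    ((List.range m).map h).set j v = (List.range m).map (fun b => if b = j then v else h b) := by
  apply List.ext_getElem
  · simp
  · intro a h1 h2
    rw [List.getElem_set]
    simp only [List.getElem_map, List.getElem_range]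
    by_cases hja : a = j
    · subst hja
      simp
    · rw [if_neg (fun hh => hja hh.symm), if_neg hja]

theorem pvSet2_grid {n m : Nat} (f : Nat → Nat → Int) {i j : Nat} (v : Int)
    (hi : i < n) (hj : j < m) :
    pvSet2 (pvGrid n m f) i j v
      = pvGrid n m (fun a b => if a = i ∧ b = j then v else f a b) := by
  rw [pvSet2, pvGridRow f hi, pvSetMapRange v _ hj]
  show ((List.range n).map (fun a => (List.range m).map (fun b => f a b))).set i _ = _
  rw [pvSetMapRange _ _ hi]
  refine List.map_congr_left ?_
  intro a _
  by_cases hai : a = i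
  · subst hai
    simp only [if_pos rfl]
    refine List.map_congr_left ?_
    intro b _
    by_cases hbj : b = j <;> simp [hbj]
  · simp only [if_neg hai]
    refine List.map_congr_left ?_
    intro b _
    simp [hai]

-- ----- A side -----

theorem stageA_row (matrix : List (List Int)) (n m : Nat) (hn : 0 < n) :
    ∀ k, k < m →
    (List.range' 1 k).foldl
        (fun s idx => pvSet2 s 0 idx (pvGet2 s 0 (idx - 1) + pvGet2 matrix 0 idx))
        (pvGrid n m (fun a b => if a = 0 ∧ b = 0 then pvGet2 matrix 0 0 else 0))
    = pvGrid n m (fun a b => if a = 0 ∧ b ≤ k then pvP matrix 0 b else 0) := by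
  intro k
  induction k with
  | zero =>
    intro _
    simp only [List.range'_zero, List.foldl_nil]
    refine pvGrid_congr ?_
    intro a _ b _
    by_cases h : a = 0 ∧ b = 0
    · rw [if_pos h, if_pos (by omega)]
      obtain ⟨rfl, rfl⟩ := h
      exact (pvP_00 matrix).symm
    · rw [if_neg h, if_neg (by omega)]
  | succ k ih =>
    intro hk
    rw [List.range'_concat, List.foldl_append]
    rw [ih (by omega)]
    simp only [List.foldl_cons, List.foldl_nil]
    have h1k : 1 + 1 * k = k + 1 := by omega
    rw [h1k]
    have hd : k + 1 - 1 = k := by omega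
    rw [hd]
    rw [pvGet2_grid _ hn (by omega)]
    have hv : (if (0 : Nat) = 0 ∧ k ≤ k then pvP matrix 0 k else 0) + pvGet2 matrix 0 (k + 1)
        = pvP matrix 0 (k + 1) := by
      simp [pvP_row]
    rw [hv, pvSet2_grid _ _ hn hk]
    refine pvGrid_congr ?_
    intro a _ b _
    by_cases h : a = 0 ∧ b = k + 1
    · rw [if_pos h, if_pos (by omega)]
      obtain ⟨rfl, rfl⟩ := h
      rfl
    · rw [if_neg h]
      exact if_congr (by omega) rfl rfl

theorem stageA_col (matrix : List (List Int)) (n m : Nat) (hm : 0 < m) :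
    ∀ k, k < n →
    (List.range' 1 k).foldl
        (fun s idx => pvSet2 s idx 0 (pvGet2 s (idx - 1) 0 + pvGet2 matrix idx 0))
        (pvGrid n m (fun a b => if a = 0 then pvP matrix 0 b else 0))
    = pvGrid n m (fun a b => if a = 0 ∨ (b = 0 ∧ a ≤ k) then pvP matrix a b else 0) := by
  intro k
  induction k with
  | zero =>
    intro _
    simp only [List.range'_zero, List.foldl_nil]
    refine pvGrid_congr ?_
    intro a _ b _
    by_cases ha : a = 0
    · rw [if_pos ha, if_pos (by omega)]
      subst ha; rfl
    · rw [if_neg ha, if_neg (by omega)]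
  | succ k ih =>
    intro hk
    rw [List.range'_concat, List.foldl_append]
    rw [ih (by omega)]
    simp only [List.foldl_cons, List.foldl_nil]
    have h1k : 1 + 1 * k = k + 1 := by omega
    rw [h1k]
    have hd : k + 1 - 1 = k := by omega
    rw [hd]
    rw [pvGet2_grid _ (by omega) hm]
    have hv : (if k = 0 ∨ ((0 : Nat) = 0 ∧ k ≤ k) then pvP matrix k 0 else 0) + pvGet2 matrix (k + 1) 0
        = pvP matrix (k + 1) 0 := by
      simp [pvP_col]
    rw [hv, pvSet2_grid _ _ hk hm]
    refine pvGrid_congr ?_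
    intro a _ b _
    by_cases h : a = k + 1 ∧ b = 0
    · rw [if_pos h, if_pos (by omega)]
      obtain ⟨rfl, rfl⟩ := h
      rfl
    · rw [if_neg h]
      exact if_congr (by omega) rfl rfl

theorem stageA_inner (matrix : List (List Int)) (n m i : Nat) (hrn : i + 1 < n) :
    ∀ k, k < m →
    (List.range' 1 k).foldl
        (fun s col => pvSet2 s (i + 1) col
          (pvGet2 s (i + 1 - 1) col + pvGet2 s (i + 1) (col - 1) - pvGet2 s (i + 1 - 1) (col - 1)
            + pvGet2 matrix (i + 1) col))
        (pvGrid n m (fun a b => if a < i + 1 ∨ b = 0 then pvP matrix a b else 0))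
    = pvGrid n m (fun a b => if a < i + 1 ∨ b = 0 ∨ (a = i + 1 ∧ b ≤ k) then pvP matrix a b else 0) := by
  intro k
  induction k with
  | zero =>
    intro _
    simp only [List.range'_zero, List.foldl_nil]
    refine pvGrid_congr ?_
    intro a _ b _
    exact if_congr (by omega) rfl rfl
  | succ k ih =>
    intro hk
    rw [List.range'_concat, List.foldl_append]
    rw [ih (by omega)]
    simp only [List.foldl_cons, List.foldl_nil]
    have h1k : 1 + 1 * k = k + 1 := by omega
    rw [h1k]
    have hd1 : i + 1 - 1 = i := by omega
    have hd2 : k + 1 - 1 = k := by omega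
    rw [hd1, hd2]
    rw [pvGet2_grid _ (by omega) hk, pvGet2_grid _ hrn (by omega), pvGet2_grid _ (by omega) (by omega)]
    have hv : (if i < i + 1 ∨ k + 1 = 0 ∨ (i = i + 1 ∧ k + 1 ≤ k) then pvP matrix i (k + 1) else 0)
        + (if i + 1 < i + 1 ∨ k = 0 ∨ (i + 1 = i + 1 ∧ k ≤ k) then pvP matrix (i + 1) k else 0)
        - (if i < i + 1 ∨ k = 0 ∨ (i = i + 1 ∧ k ≤ k) then pvP matrix i k else 0)
        + pvGet2 matrix (i + 1) (k + 1)
        = pvP matrix (i + 1) (k + 1) := by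
      rw [if_pos (show i < i + 1 ∨ k + 1 = 0 ∨ (i = i + 1 ∧ k + 1 ≤ k) by omega),
        if_pos (show i + 1 < i + 1 ∨ k = 0 ∨ (i + 1 = i + 1 ∧ k ≤ k) by omega),
        if_pos (show i < i + 1 ∨ k = 0 ∨ (i = i + 1 ∧ k ≤ k) by omega)]
      have h := pvP_rect matrix i k
      omega
    rw [hv, pvSet2_grid _ _ hrn hk]
    refine pvGrid_congr ?_
    intro a _ b _
    by_cases h : a = i + 1 ∧ b = k + 1
    · rw [if_pos h, if_pos (by omega)]
      obtain ⟨rfl, rfl⟩ := h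
      rfl
    · rw [if_neg h]
      exact if_congr (by omega) rfl rfl

theorem stageA_outer (matrix : List (List Int)) (n m : Nat)
    (hn : n = matrix.length) (hm : 0 < m)
    (hrect : ∀ r ∈ matrix, r.length = m) :
    ∀ k, k < n →
    (List.range' 1 k).foldl
        (fun s row => (List.range' 1 ((matrix.getD row []).length - 1)).foldl
          (fun s col => pvSet2 s row col
            (pvGet2 s (row - 1) col + pvGet2 s row (col - 1) - pvGet2 s (row - 1) (col - 1)
              + pvGet2 matrix row col)) s)
        (pvGrid n m (fun a b => if a = 0 ∨ b = 0 then pvP matrix a b else 0))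
    = pvGrid n m (fun a b => if a ≤ k ∨ b = 0 then pvP matrix a b else 0) := by
  intro k
  induction k with
  | zero =>
    intro _
    simp only [List.range'_zero, List.foldl_nil]
    refine pvGrid_congr ?_
    intro a _ b _
    exact if_congr (by omega) rfl rfl
  | succ k ih =>
    intro hk
    rw [List.range'_concat, List.foldl_append]
    rw [ih (by omega)]
    simp only [List.foldl_cons, List.foldl_nil]
    have h1k : 1 + 1 * k = k + 1 := by omega
    rw [h1k]
    have hlen : (matrix.getD (k + 1) []).length = m := by
      have hmem : matrix.getD (k + 1) [] ∈ matrix := by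
        rw [List.getD_eq_getElem?_getD]
        have : (k + 1) < matrix.length := by omega
        simp only [List.getElem?_eq_getElem this, Option.getD_some]
        exact List.getElem_mem _
      exact hrect _ hmem
    rw [hlen]
    have hstart : pvGrid n m (fun a b => if a ≤ k ∨ b = 0 then pvP matrix a b else 0)
        = pvGrid n m (fun a b => if a < k + 1 ∨ b = 0 then pvP matrix a b else 0) := by
      refine pvGrid_congr ?_
      intro a _ b _
      exact if_congr (by omega) rfl rfl
    rw [hstart, stageA_inner matrix n m k (by omega) (m - 1) (by omega)]
    refine pvGrid_congr ?_
    intro a _ b hb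
    exact if_congr (by omega) rfl rfl

theorem createSumMatric_eq_grid (matrix : List (List Int))
    (hPre : Pre_createSumMatric matrix) :
    createSumMatric matrix
      = pvGrid matrix.length (matrix.headD []).length (pvP matrix) := by
  obtain ⟨hne, hrow, hrect⟩ := hPre
  have hn : 0 < matrix.length := List.length_pos_iff.mpr hne
  have hm : 0 < (matrix.headD []).length := List.length_pos_iff.mpr hrow
  unfold createSumMatric
  dsimp only []
  have hinit : ((List.range matrix.length).map
      (fun _ => (List.range (matrix.headD []).length).map (fun _ => (0 : Int))))
      = pvGrid matrix.length (matrix.headD []).length (fun _ _ => 0) := rfl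
  rw [hinit, pvSet2_grid _ _ hn hm]
  have h0 : pvGrid matrix.length (matrix.headD []).length
        (fun a b => if a = 0 ∧ b = 0 then pvGet2 matrix 0 0 else (fun _ _ => (0 : Int)) a b)
      = pvGrid matrix.length (matrix.headD []).length
        (fun a b => if a = 0 ∧ b = 0 then pvGet2 matrix 0 0 else 0) := rfl
  rw [h0, stageA_row matrix matrix.length (matrix.headD []).length hn
        ((matrix.headD []).length - 1) (by omega)]
  have h1 : pvGrid matrix.length (matrix.headD []).length
        (fun a b => if a = 0 ∧ b ≤ (matrix.headD []).length - 1 then pvP matrix 0 b else 0)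
      = pvGrid matrix.length (matrix.headD []).length
        (fun a b => if a = 0 then pvP matrix 0 b else 0) := by
    refine pvGrid_congr ?_
    intro a _ b hb
    exact if_congr (by omega) rfl rfl
  rw [h1, stageA_col matrix matrix.length (matrix.headD []).length hm
        (matrix.length - 1) (by omega)]
  have h2 : pvGrid matrix.length (matrix.headD []).length
        (fun a b => if a = 0 ∨ (b = 0 ∧ a ≤ matrix.length - 1) then pvP matrix a b else 0)
      = pvGrid matrix.length (matrix.headD []).length
        (fun a b => if a = 0 ∨ b = 0 then pvP matrix a b else 0) := by
    refine pvGrid_congr ?_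
    intro a ha b _
    exact if_congr (by omega) rfl rfl
  rw [h2, stageA_outer matrix matrix.length (matrix.headD []).length rfl hm hrect
        (matrix.length - 1) (by omega)]
  refine pvGrid_congr ?_
  intro a ha b _
  rw [if_pos (Or.inl (by omega))]

-- ----- B side -----

theorem pvFoldlAppend {α : Type} (h : Nat → α) :
    ∀ (n : Nat) (s : List α),
    (List.range n).foldl (fun s i => s ++ [h i]) s = s ++ (List.range n).map h := by
  intro n
  induction n with
  | zero => intro s; simp
  | succ k ih =>
    intro s
    rw [List.range_succ, List.foldl_append, ih]
    simp [List.range_succ]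

theorem pvHRow_eq (r : List Int) :
    ∀ (m : Nat),
    (List.range m).foldl (fun (p : Int × List Int) j =>
        let a := p.1 + r.getD j 0
        (a, p.2 ++ [a])) ((0 : Int), ([] : List Int))
    = (∑ b ∈ Finset.range m, r.getD b 0,
        (List.range m).map (fun j => ∑ b ∈ Finset.range (j + 1), r.getD b 0)) := by
  intro m
  induction m with
  | zero => simp
  | succ k ih =>
    rw [List.range_succ, List.foldl_append, ih]
    simp [Finset.sum_range_succ, List.range_succ]

theorem stageB_inner (matrix : List (List Int)) (n m i : Nat) (hrn : i + 1 < n) :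
    ∀ k, k ≤ m →
    (List.range k).foldl
        (fun s j => pvSet2 s (i + 1) j (pvGet2 s (i + 1) j + pvGet2 s (i + 1 - 1) j))
        (pvGrid n m (fun a b => if a < i + 1 then pvP matrix a b else pvR matrix a b))
    = pvGrid n m (fun a b => if a < i + 1 ∨ (a = i + 1 ∧ b < k) then pvP matrix a b else pvR matrix a b) := by
  intro k
  induction k with
  | zero =>
    intro _
    simp only [List.range_zero, List.foldl_nil]
    refine pvGrid_congr ?_
    intro a _ b _
    exact if_congr (by omega) rfl rfl
  | succ k ih =>
    intro hk
    rw [List.range_succ, List.foldl_append]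
    rw [ih (by omega)]
    simp only [List.foldl_cons, List.foldl_nil]
    have hd1 : i + 1 - 1 = i := by omega
    rw [hd1]
    rw [pvGet2_grid _ hrn (by omega), pvGet2_grid _ (by omega) (by omega)]
    have hv : (if i + 1 < i + 1 ∨ (i + 1 = i + 1 ∧ k < k) then pvP matrix (i + 1) k else pvR matrix (i + 1) k)
        + (if i < i + 1 ∨ (i = i + 1 ∧ k < k) then pvP matrix i k else pvR matrix i k)
        = pvP matrix (i + 1) k := by
      rw [if_neg (by omega), if_pos (by omega)]
      have := pvP_step matrix i k
      omega
    rw [hv, pvSet2_grid _ _ hrn (by omega)]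
    refine pvGrid_congr ?_
    intro a _ b _
    by_cases h : a = i + 1 ∧ b = k
    · rw [if_pos h, if_pos (by omega)]
      obtain ⟨rfl, rfl⟩ := h
      rfl
    · rw [if_neg h]
      exact if_congr (by omega) rfl rfl

theorem stageB_outer (matrix : List (List Int)) (n m : Nat) :
    ∀ k, k < n →
    (List.range' 1 k).foldl
        (fun s i => (List.range m).foldl
          (fun s j => pvSet2 s i j (pvGet2 s i j + pvGet2 s (i - 1) j)) s)
        (pvGrid n m (pvR matrix))
    = pvGrid n m (fun a b => if a ≤ k then pvP matrix a b else pvR matrix a b) := by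
  intro k
  induction k with
  | zero =>
    intro _
    simp only [List.range'_zero, List.foldl_nil]
    refine pvGrid_congr ?_
    intro a _ b _
    by_cases ha : a = 0
    · rw [if_pos (by omega)]
      subst ha
      exact (pvP_zero_row matrix b).symm
    · rw [if_neg (by omega)]
  | succ k ih =>
    intro hk
    rw [List.range'_concat, List.foldl_append]
    rw [ih (by omega)]
    simp only [List.foldl_cons, List.foldl_nil]
    have h1k : 1 + 1 * k = k + 1 := by omega
    rw [h1k]
    have hstart : pvGrid n m (fun a b => if a ≤ k then pvP matrix a b else pvR matrix a b)
        = pvGrid n m (fun a b => if a < k + 1 then pvP matrix a b else pvR matrix a b) := by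
      refine pvGrid_congr ?_
      intro a _ b _
      exact if_congr (by omega) rfl rfl
    rw [hstart, stageB_inner matrix n m k (by omega) m (by omega)]
    refine pvGrid_congr ?_
    intro a _ b hb
    exact if_congr (by omega) rfl rfl

theorem createSumMatric_alt_eq_grid (matrix : List (List Int))
    (hPre : Pre_createSumMatric matrix) :
    createSumMatric_alt matrix
      = pvGrid matrix.length (matrix.headD []).length (pvP matrix) := by
  obtain ⟨hne, hrow, hrect⟩ := hPre
  have hn : 0 < matrix.length := List.length_pos_iff.mpr hne
  have hm : 0 < (matrix.headD []).length := List.length_pos_iff.mpr hrow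
  unfold createSumMatric_alt
  dsimp only []
  have hpass1 : (List.range matrix.length).foldl
        (fun s i => s ++ [pvHRow (matrix.getD i []) ((matrix.headD []).length)]) []
      = pvGrid matrix.length ((matrix.headD []).length) (pvR matrix) := by
    rw [pvFoldlAppend]
    simp only [List.nil_append]
    refine List.map_congr_left ?_
    intro i _
    rw [pvHRow, pvHRow_eq]
    rfl
  rw [hpass1, stageB_outer matrix matrix.length ((matrix.headD []).length)
        (matrix.length - 1) (by omega)]
  refine pvGrid_congr ?_
  intro a ha b _
  rw [if_pos (by omega)]

-- ===== VERDICT (by name: the statement is the Claim_ definition above) =====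
theorem createSumMatric_spec : Claim_equal_createSumMatric := by
  intro matrix _ hpre
  unfold Spec_createSumMatric
  rw [createSumMatric_eq_grid matrix hpre, createSumMatric_alt_eq_grid matrix hpre]
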